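-- pv_equiv track=rewrite | github.com/xyfzkd/comp_bio | DailyMeiju/DailyMeiju/emailUtil.py | format_data
-- ===== SOURCE A (Python) =====
-- def format_data(send_data):
--     result_dict = dict()
--     for item in send_data:
--         item_name = item["video_title_ch"]
--         if item_name in result_dict.keys():
--             result_dict[item_name].append(item)
--         else:
--             temp_list = list()
--             temp_list.append(item)
--             result_dict[item_name] = temp_list
--     for keys in result_dict.keys():
--         temp_list = result_dict[keys]
--         temp_list.sort(key=lambda k: (k['video_season_episode']), reverse=True)
--         temp_list.sort(key=lambda k: (k['video_publish_time'][:-1]), reverse=False)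
--     return result_dict
-- ===== SOURCE B (Python) =====
-- def format_data(send_data):
--     result_dict = {item["video_title_ch"]: [] for item in send_data}
--     ordered = sorted(send_data, key=lambda k: (k['video_season_episode']), reverse=True)
--     ordered.sort(key=lambda k: (k['video_publish_time'][:-1]), reverse=False)
--     for item in ordered:
--         result_dict[item["video_title_ch"]].append(item)
--     return result_dict
-- ===== Notes on version B (the rewrite author's own statement) =====
-- stated objective: alternative
-- what changed: A groups items by title first and then sorts each group with two stable passes; B runs the same two stable sort passes once over the whole list and then groups the globally sorted items with a single appending pass over a pre-seeded dict.
import Mathlib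
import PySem

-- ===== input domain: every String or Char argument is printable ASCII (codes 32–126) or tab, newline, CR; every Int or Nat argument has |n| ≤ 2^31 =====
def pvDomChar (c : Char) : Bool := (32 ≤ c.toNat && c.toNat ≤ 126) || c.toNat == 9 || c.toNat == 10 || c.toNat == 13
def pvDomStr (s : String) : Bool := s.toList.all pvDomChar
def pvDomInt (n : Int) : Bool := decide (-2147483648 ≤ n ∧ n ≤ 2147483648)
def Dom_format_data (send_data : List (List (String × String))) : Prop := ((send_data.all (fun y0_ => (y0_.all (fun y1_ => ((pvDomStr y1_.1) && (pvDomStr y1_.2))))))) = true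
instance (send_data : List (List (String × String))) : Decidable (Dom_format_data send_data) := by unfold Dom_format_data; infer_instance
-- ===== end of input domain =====

-- B replaces A's group-then-sort-each-group by two global stable sort passes followed by a single
-- grouping pass (sort-then-group); same return value, A does not mutate its argument and neither does B.

-- item[k]: first-match lookup in the item's association list. Python raises KeyError when the key is
-- absent; Pre_format_data excludes exactly those inputs, so the "" default is never reached there.
def pvGet (item : List (String × String)) (k : String) : String :=
  (((item.find? (fun p => p.1 == k)).map (fun p => p.2)).getD "")

def keyTitle (item : List (String × String)) : String := pvGet item "video_title_ch"
def keyEp (item : List (String × String)) : String := pvGet item "video_season_episode"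
-- k['video_publish_time'][:-1]
def keyPub (item : List (String × String)) : String :=
  PySem.Str.slice (pvGet item "video_publish_time") none (some (-1))

-- ===== PORT A =====
def format_data (send_data : List (List (String × String))) : List (String × List (List (String × String))) :=
  -- first loop: build result_dict, appending each item to its title's list
  let result_dict : PySem.Dict String (List (List (String × String))) :=
    send_data.foldl (fun d item =>
      let item_name := keyTitle item
      if d.contains item_name then d.insert item_name (d.getD item_name [] ++ [item])
      else d.insert item_name [item]) PySem.Dict.empty
  -- second loop: sort each group in place (episode desc, then publish-time-prefix asc; stable)
  let result_dict2 :=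
    result_dict.keys.foldl (fun d keys =>
      d.insert keys
        (PySem.List.sorted (PySem.List.sorted (d.getD keys []) keyEp true) keyPub false)) result_dict
  result_dict2.items

-- ===== PORT B =====
def format_data_alt (send_data : List (List (String × String))) : List (String × List (List (String × String))) :=
  -- result_dict = {item["video_title_ch"]: [] for item in send_data}
  let result_dict : PySem.Dict String (List (List (String × String))) :=
    send_data.foldl (fun d item => d.insert (keyTitle item) []) PySem.Dict.empty
  -- ordered = sorted(send_data, key=episode, reverse=True); ordered.sort(key=publish-time-prefix)
  let ordered := PySem.List.sorted (PySem.List.sorted send_data keyEp true) keyPub false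
  -- for item in ordered: result_dict[item["video_title_ch"]].append(item)   (the key always exists)
  let filled := ordered.foldl (fun d item => d.modify (keyTitle item) [] (fun l => l ++ [item])) result_dict
  filled.items

-- ===== PRECONDITION & SPEC =====
-- Pre_ excludes exactly the inputs where some item lacks one of the three looked-up keys:
-- Python's A raises KeyError there.
def Pre_format_data (send_data : List (List (String × String))) : Prop :=
  (send_data.all (fun item =>
    (item.find? (fun p => p.1 == "video_title_ch")).isSome &&
    (item.find? (fun p => p.1 == "video_season_episode")).isSome &&
    (item.find? (fun p => p.1 == "video_publish_time")).isSome)) = true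
-- (an item such as {"video_title_ch": "Oshi no Ko"} alone is excluded: the sort-key lookups raise)
instance (send_data : List (List (String × String))) : Decidable (Pre_format_data send_data) := by
  unfold Pre_format_data; infer_instance

def pvWitness_format_data : (List (List (String × String))) :=
  [[("video_title_ch", "a"), ("video_season_episode", "2"), ("video_publish_time", "2020x")],
   [("video_title_ch", "a"), ("video_season_episode", "1"), ("video_publish_time", "2019x")],
   [("video_title_ch", "b"), ("video_season_episode", "1"), ("video_publish_time", "2020x")]]

def Spec_format_data (send_data : List (List (String × String))) (out : List (String × List (List (String × String)))) : Prop := out = format_data_alt send_data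
instance (send_data : List (List (String × String))) (out : List (String × List (List (String × String)))) : Decidable (Spec_format_data send_data out) := by unfold Spec_format_data; infer_instance

-- ===== CLAIM (what is proved, stated in full; the proofs are below) =====
def Claim_equal_format_data : Prop := ∀ (send_data : List (List (String × String))), Dom_format_data send_data → Pre_format_data send_data → Spec_format_data send_data (format_data send_data)

-- ===== LEMMAS AND PROOFS =====

-- inserting an element that sorts before everything in the list puts it in front
theorem insertBy_all_before {α : Type} (before : α → α → Bool) (x : α) (l : List α)
    (h : ∀ z ∈ l, before x z = true) : PySem.List.insertBy before x l = x :: l := by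
  cases l with
  | nil => rfl
  | cons y t => simp [PySem.List.insertBy, h y (by simp)]

-- filtering commutes with a single insertion into a list that is coherent for x
theorem filter_insertBy {α : Type} (before : α → α → Bool) (x : α) (p : α → Bool) :
    ∀ (l : List α), l.Pairwise (fun a b => before x a = true → before x b = true) →
    (PySem.List.insertBy before x l).filter p =
      if p x then PySem.List.insertBy before x (l.filter p) else l.filter p := by
  intro l
  induction l with
  | nil =>
    intro _
    cases hx : p x <;> simp [PySem.List.insertBy, hx]
  | cons y t ih =>
    intro h
    rcases List.pairwise_cons.mp h with ⟨hy, ht⟩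
    by_cases hb : before x y = true
    · have hall : ∀ z ∈ (y :: t).filter p, before x z = true := by
        intro z hz
        rcases List.mem_filter.mp hz with ⟨hz, _⟩
        rcases List.mem_cons.mp hz with rfl | hz
        · exact hb
        · exact hy z hz hb
      rw [insertBy_all_before before x ((y :: t).filter p) hall]
      cases hx : p x <;> cases hyp : p y <;>
        simp [PySem.List.insertBy, hb, hx, hyp]
    · have hb' : before x y = false := by simpa using hb
      cases hx : p x <;> cases hyp : p y <;>
        simp [PySem.List.insertBy, hb', hx, hyp, ih ht]

-- filtering commutes with Python's stable sort (both directions of reverse)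
theorem filter_sorted {α κ : Type} [LinearOrder κ] (key : α → κ) (p : α → Bool) (rev : Bool)
    (xs : List α) :
    (PySem.List.sorted xs key rev).filter p = PySem.List.sorted (xs.filter p) key rev := by
  induction xs using List.reverseRecOn with
  | nil => cases rev <;> rfl
  | append_singleton ys x ih =>
    cases rev
    · have hfold : ∀ (l : List α), PySem.List.sorted (l ++ [x]) key false =
          PySem.List.insertBy (fun a b => decide (key a < key b)) x (PySem.List.sorted l key false) := by
        intro l
        rw [PySem.List.sorted_eq_foldl_insertBy, PySem.List.sorted_eq_foldl_insertBy,
          List.foldl_append]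
        rfl
      have hpw : (PySem.List.sorted ys key false).Pairwise
          (fun a b => (decide (key x < key a)) = true → (decide (key x < key b)) = true) := by
        refine (PySem.List.sorted_pairwise ys key).imp ?_
        intro a b hab h
        simp only [decide_eq_true_eq] at *
        exact lt_of_lt_of_le h hab
      rw [hfold ys, filter_insertBy _ _ _ _ hpw, ih, List.filter_append, List.filter_cons]
      cases hx : p x <;> simp [hfold]
    · have hfold : ∀ (l : List α), PySem.List.sorted (l ++ [x]) key true =
          PySem.List.insertBy (fun a b => decide (key b < key a)) x (PySem.List.sorted l key true) := by
        intro l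
        rw [PySem.List.sorted_rev_eq_foldl_insertBy, PySem.List.sorted_rev_eq_foldl_insertBy,
          List.foldl_append]
        rfl
      have hpw : (PySem.List.sorted ys key true).Pairwise
          (fun a b => (decide (key a < key x)) = true → (decide (key b < key x)) = true) := by
        refine (PySem.List.sorted_pairwise_rev ys key).imp ?_
        intro a b hab h
        simp only [decide_eq_true_eq] at *
        exact lt_of_le_of_lt hab h
      rw [hfold ys, filter_insertBy _ _ _ _ hpw, ih, List.filter_append, List.filter_cons]
      cases hx : p x <;> simp [hfold]

-- Dict.contains agrees with membership in keys, as a Bool on the keys list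
theorem keys_contains {κ ν : Type} [BEq κ] [LawfulBEq κ] (d : PySem.Dict κ ν) (k : κ) :
    d.keys.contains k = d.contains k := by
  cases hc : d.contains k
  · simp only [List.contains_eq_mem, decide_eq_false_iff_not]
    intro hk
    rw [← PySem.Dict.contains_iff_mem_keys] at hk
    simp [hc] at hk
  · simp [List.contains_eq_mem, (PySem.Dict.contains_iff_mem_keys d k).mp hc]

-- keys of a fold of inserts keyed by t: Set.update of the key images
theorem keys_foldl_insert_key {κ ν α : Type} [BEq κ] [LawfulBEq κ] (t : α → κ)
    (g : PySem.Dict κ ν → α → ν) :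
    ∀ (l : List α) (d : PySem.Dict κ ν),
      (l.foldl (fun d i => d.insert (t i) (g d i)) d).keys = PySem.Set.update d.keys (l.map t) := by
  intro l
  induction l with
  | nil => intro d; simp [PySem.Set.update]
  | cons i l ih =>
    intro d
    have hadd : (d.insert (t i) (g d i)).keys = PySem.Set.add d.keys (t i) := by
      simp only [PySem.Set.add, PySem.Set.contains, keys_contains d (t i)]
      by_cases hc : d.contains (t i) = true
      · rw [PySem.Dict.keys_insert_of_contains d _ hc, hc, if_pos rfl]
      · rw [PySem.Dict.keys_insert_of_not_contains d _ (by simpa using hc)]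
        simp [Bool.eq_false_iff.mpr hc]
    simp only [List.foldl_cons, List.map_cons, ih, hadd]
    rfl

-- keys stay duplicate-free along such a fold
theorem nodup_keys_foldl_insert_key {κ ν α : Type} [BEq κ] [LawfulBEq κ] (t : α → κ)
    (g : PySem.Dict κ ν → α → ν) :
    ∀ (l : List α) (d : PySem.Dict κ ν), d.keys.Nodup →
      (l.foldl (fun d i => d.insert (t i) (g d i)) d).keys.Nodup := by
  intro l
  induction l with
  | nil => intro d h; exact h
  | cons i l ih => intro d h; exact ih _ (PySem.Dict.nodup_keys_insert d _ _ h)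

-- a fold that only ever inserts [] keeps every value at []
theorem getD_foldl_insert_nil {κ α : Type} [BEq κ] [LawfulBEq κ] [DecidableEq κ] (t : α → κ) :
    ∀ (l : List α) (d : PySem.Dict κ (List (List (κ × κ)))) (c : κ), d.getD c [] = [] →
      (l.foldl (fun d i => d.insert (t i) ([] : List (List (κ × κ)))) d).getD c [] = [] := by
  intro l
  induction l with
  | nil => intro d c h; exact h
  | cons i l ih =>
    intro d c h
    refine ih _ _ ?_
    rw [PySem.Dict.getD_insert]
    split <;> simp [h]

-- a dict with duplicate-free keys is the pairing of each key with its stored value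
theorem items_eq_keys_map {κ ν : Type} [BEq κ] [LawfulBEq κ] (d : PySem.Dict κ (List ν))
    (h : d.keys.Nodup) : d.items = d.keys.map (fun k => (k, d.getD k [])) := by
  have hk : d.keys = d.items.map (fun p => p.1) := rfl
  rw [hk, List.map_map]
  conv_lhs => rw [← List.map_id d.items]
  refine List.map_congr_left ?_
  intro p hp
  have := PySem.Dict.getD_of_mem_items d (k := p.1) (v := p.2) (by simpa using hp) h []
  simp [Function.comp, this]

-- rewriting every present key's value through f, iterated over a duplicate-free key list
theorem foldl_insert_map_items {κ ν : Type} [BEq κ] [LawfulBEq κ] [DecidableEq κ]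
    (f : List ν → List ν) :
    ∀ (ks : List κ) (d : PySem.Dict κ (List ν)), ks.Nodup → d.keys.Nodup →
      (∀ k ∈ ks, d.contains k = true) →
      (ks.foldl (fun d k => d.insert k (f (d.getD k []))) d).items =
        d.items.map (fun p => if p.1 ∈ ks then (p.1, f p.2) else p) := by
  intro ks
  induction ks with
  | nil => intro d _ _ _; simp
  | cons k ks ih =>
    intro d hks hd hall
    rcases List.nodup_cons.mp hks with ⟨hknot, hksn⟩
    have hc : d.contains k = true := hall k (by simp)
    have hstep : ∀ k' ∈ ks, (d.insert k (f (d.getD k []))).contains k' = true := by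
      intro k' hk'
      rw [PySem.Dict.contains_insert]
      simp [hall k' (List.mem_cons_of_mem _ hk')]
    rw [List.foldl_cons, ih _ hksn (PySem.Dict.nodup_keys_insert d _ _ hd) hstep,
      PySem.Dict.items_insert_of_contains d _ hc, List.map_map]
    refine List.map_congr_left ?_
    intro p hp
    have hval : d.getD p.1 [] = p.2 :=
      PySem.Dict.getD_of_mem_items d (k := p.1) (v := p.2) (by simpa using hp) hd []
    by_cases hpk : p.1 = k
    · rw [hpk] at hval
      simp [hpk, hknot, hval]
    · simp only [Function.comp, beq_iff_eq, hpk, if_false, List.mem_cons]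
      by_cases hmem : p.1 ∈ ks <;> simp [hmem]

-- the value stored under c after A's first loop is the subsequence of items titled c
theorem getD_groupFold {t : List (String × String) → String}
    (l : List (List (String × String))) (c : String) :
    (l.foldl (fun d item =>
        if d.contains (t item) then d.insert (t item) (d.getD (t item) [] ++ [item])
        else d.insert (t item) [item]) PySem.Dict.empty).getD c [] =
      l.filter (fun i => t i == c) := by
  have hstep : (fun (d : PySem.Dict String (List (List (String × String)))) item =>
      if d.contains (t item) then d.insert (t item) (d.getD (t item) [] ++ [item])
      else d.insert (t item) [item]) =
      (fun d item => d.modify (t item) [] (fun l => l ++ [item])) := by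
    funext d item
    by_cases hc : d.contains (t item) = true
    · simp [PySem.Dict.modify, hc]
    · simp [PySem.Dict.modify, hc, PySem.Dict.getD_of_not_contains d _ (by simpa using hc)]
  rw [hstep]
  have hmap : l.foldl (fun d item => d.modify (t item) [] (fun l => l ++ [item]))
      PySem.Dict.empty =
      (l.map (fun i => (t i, i))).foldl (fun d p => d.modify p.1 [] (fun l => l ++ [p.2]))
        PySem.Dict.empty := by
    rw [List.foldl_map]
  rw [hmap, PySem.Dict.getD_foldl_modify_append, PySem.Dict.getD_empty, List.filter_map,
    List.map_map]
  simp [Function.comp_def]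

-- B's grouping pass over any list seeded with empty groups yields the same filters
theorem getD_appendFold {t : List (String × String) → String}
    (l : List (List (String × String))) (d : PySem.Dict String (List (List (String × String))))
    (c : String) (h : d.getD c [] = []) :
    (l.foldl (fun d item => d.modify (t item) [] (fun l => l ++ [item])) d).getD c [] =
      l.filter (fun i => t i == c) := by
  have hmap : l.foldl (fun d item => d.modify (t item) [] (fun l => l ++ [item])) d =
      (l.map (fun i => (t i, i))).foldl (fun d p => d.modify p.1 [] (fun l => l ++ [p.2])) d := by
    rw [List.foldl_map]
  rw [hmap, PySem.Dict.getD_foldl_modify_append, h, List.filter_map, List.map_map]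
  simp [Function.comp_def]

theorem format_data_eq (send_data : List (List (String × String))) :
    format_data send_data = format_data_alt send_data := by
  classical
  unfold format_data format_data_alt
  simp only []
  -- name the shared pieces
  set K : List String := PySem.Set.update [] (send_data.map keyTitle) with hK
  set sfun : List (List (String × String)) → List (List (String × String)) :=
    fun l => PySem.List.sorted (PySem.List.sorted l keyEp true) keyPub false with hsfun
  set d1 := send_data.foldl (fun d item =>
      let item_name := keyTitle item
      if d.contains item_name then d.insert item_name (d.getD item_name [] ++ [item])
      else d.insert item_name [item]) PySem.Dict.empty with hd1
  set d0 := send_data.foldl (fun d item =>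
      d.insert (keyTitle item) ([] : List (List (String × String)))) PySem.Dict.empty with hd0
  set s2 := PySem.List.sorted (PySem.List.sorted send_data keyEp true) keyPub false with hs2
  set df := s2.foldl (fun d item => d.modify (keyTitle item) [] (fun l => l ++ [item])) d0 with hdf
  -- keys of d1
  have hd1' : d1 = send_data.foldl (fun d item =>
      d.insert (keyTitle item)
        (if d.contains (keyTitle item) then d.getD (keyTitle item) [] ++ [item] else [item]))
      PySem.Dict.empty := by
    rw [hd1]
    congr 1
    funext d item
    by_cases hc : d.contains (keyTitle item) = true <;> simp [hc]
  have hkeys1 : d1.keys = K := by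
    rw [hd1', keys_foldl_insert_key, PySem.Dict.keys_empty, hK]
  have hnodupK : K.Nodup := by
    rw [← hkeys1, hd1']
    exact nodup_keys_foldl_insert_key _ _ _ _ PySem.Dict.nodup_keys_empty
  have hgetD1 : ∀ c, d1.getD c [] = send_data.filter (fun i => keyTitle i == c) := by
    intro c; rw [hd1]; exact getD_groupFold send_data c
  -- keys and values of d0
  have hkeys0 : d0.keys = K := by
    rw [hd0, keys_foldl_insert_key keyTitle (fun _ _ => []), PySem.Dict.keys_empty, hK]
  have hgetD0 : ∀ c, d0.getD c [] = [] := by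
    intro c
    rw [hd0]
    exact getD_foldl_insert_nil keyTitle send_data PySem.Dict.empty c (PySem.Dict.getD_empty c [])
  -- keys of df: no new titles appear in the sorted copy
  have hmem_s2 : ∀ i ∈ s2, i ∈ send_data := by
    intro i hi
    rw [hs2] at hi
    exact (PySem.List.mem_sorted _ _ _ _).mp ((PySem.List.mem_sorted _ _ _ _).mp hi)
  have hkeysdf : df.keys = K := by
    have : df = s2.foldl (fun d item =>
        d.insert (keyTitle item) (d.getD (keyTitle item) [] ++ [item])) d0 := by rw [hdf]; rfl
    rw [this, keys_foldl_insert_key keyTitle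
        (fun d i => d.getD (keyTitle i) [] ++ [i]), hkeys0,
      PySem.Set.update_eq_append_filter, List.filter_eq_nil_iff.mpr, List.append_nil]
    intro y hy
    rcases (PySem.Set.mem_ofList _ _).mp hy with hy'
    rcases List.mem_map.mp hy' with ⟨i, hi, rfl⟩
    have : keyTitle i ∈ K := by
      rw [hK, show PySem.Set.update ([] : List String) (send_data.map keyTitle) =
          PySem.Set.ofList (send_data.map keyTitle) from rfl, PySem.Set.mem_ofList]
      exact List.mem_map_of_mem (hmem_s2 i hi)
    simp [List.contains_eq_mem, this]
  have hgetDdf : ∀ c, df.getD c [] = s2.filter (fun i => keyTitle i == c) := by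
    intro c
    rw [hdf]
    exact getD_appendFold s2 d0 c (hgetD0 c)
  -- A's second loop maps sfun over the stored groups
  have hcont1 : ∀ k ∈ d1.keys, d1.contains k = true := by
    intro k hk; exact (PySem.Dict.contains_iff_mem_keys d1 k).mpr hk
  have hA : (d1.keys.foldl (fun d k => d.insert k (sfun (d.getD k []))) d1).items =
      d1.items.map (fun p => (p.1, sfun p.2)) := by
    rw [foldl_insert_map_items sfun d1.keys d1 (by rw [hkeys1]; exact hnodupK)
        (by rw [hkeys1]; exact hnodupK) hcont1]
    refine List.map_congr_left ?_
    intro p hp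
    simp [PySem.Dict.mem_keys_of_mem_items d1 hp]
  have hitems1 : d1.items = K.map (fun k => (k, d1.getD k [])) := by
    rw [← hkeys1]
    exact items_eq_keys_map d1 (by rw [hkeys1]; exact hnodupK)
  have hitemsdf : df.items = K.map (fun k => (k, df.getD k [])) := by
    rw [← hkeysdf]
    exact items_eq_keys_map df (by rw [hkeysdf]; exact hnodupK)
  -- assemble
  rw [hA, hitems1, hitemsdf, List.map_map]
  refine List.map_congr_left ?_
  intro k _
  simp only [Function.comp, hgetD1, hgetDdf, hsfun, hs2]
  rw [filter_sorted keyPub (fun i => keyTitle i == k) false,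
    filter_sorted keyEp (fun i => keyTitle i == k) true]

-- ===== VERDICT (by name: the statement is the Claim_ definition above) =====
theorem format_data_spec : Claim_equal_format_data := by
  intro send_data _ _
  show format_data send_data = format_data_alt send_data
  exact format_data_eq send_data
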